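-- pv_equiv track=rewrite | github.com/peicc-TheChosenOne/joyagent-jdgenie | genie-tool/genie_tool/tool/table_rag/utils.py | sort_dict_list_by_keys
-- ===== SOURCE A (Python) =====
-- def sort_dict_list_by_keys(dict_list, desired_order, include_extra_keys=True):
--     """
--     将字典列表中的每个字典按键的指定顺序重新排序。
--
--     :param dict_list: list[dict] - 要排序的字典列表
--     :param desired_order: list[str] - 希望的键顺序
--     :param include_extra_keys: bool - 是否包含不在 desired_order 中的键（放在最后）
--     :return: list[dict] - 重新排序后的字典列表
--     """
--     result = []
--     for d in dict_list:
--         if not isinstance(d, dict):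
--             raise ValueError(f"dict_list 中的每个元素必须是字典, {dict_list}")
--
--         # 按 desired_order 提取存在的键
--         sorted_dict = {key: d[key] for key in desired_order if key in d}
--
--         # 如果需要，把原字典中其他未在 desired_order 出现的键加在后面
--         if include_extra_keys:
--             for key in d:
--                 if key not in desired_order:
--                     sorted_dict[key] = d[key]
--
--         result.append(sorted_dict)
--
--     return result
-- ===== SOURCE B (Python) =====
-- def sort_dict_list_by_keys(dict_list, desired_order, include_extra_keys=True):
--     # rank of each desired key = its FIRST index in desired_order
--     rank = {}
--     for i, k in enumerate(desired_order):
--         rank.setdefault(k, i)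
--     sentinel = len(desired_order)
--     result = []
--     for d in dict_list:
--         if not isinstance(d, dict):
--             raise ValueError(f"dict_list 中的每个元素必须是字典, {dict_list}")
--         items = list(d.items())
--         if not include_extra_keys:
--             items = [kv for kv in items if kv[0] in rank]
--         items = sorted(items, key=lambda kv: rank.get(kv[0], sentinel))
--         result.append(dict(items))
--     return result
-- ===== Notes on version B (the rewrite author's own statement) =====
-- stated objective: faster
-- what changed: Replaces A's two passes per dict (a comprehension over desired_order plus a scan of the dict with a linear 'key not in desired_order' list test) by a rank table precomputed once (first occurrence wins) and one stable sort of each dict's items with key rank.get(k, sentinel), extras filtered out beforehand when include_extra_keys is False.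
import Mathlib
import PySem

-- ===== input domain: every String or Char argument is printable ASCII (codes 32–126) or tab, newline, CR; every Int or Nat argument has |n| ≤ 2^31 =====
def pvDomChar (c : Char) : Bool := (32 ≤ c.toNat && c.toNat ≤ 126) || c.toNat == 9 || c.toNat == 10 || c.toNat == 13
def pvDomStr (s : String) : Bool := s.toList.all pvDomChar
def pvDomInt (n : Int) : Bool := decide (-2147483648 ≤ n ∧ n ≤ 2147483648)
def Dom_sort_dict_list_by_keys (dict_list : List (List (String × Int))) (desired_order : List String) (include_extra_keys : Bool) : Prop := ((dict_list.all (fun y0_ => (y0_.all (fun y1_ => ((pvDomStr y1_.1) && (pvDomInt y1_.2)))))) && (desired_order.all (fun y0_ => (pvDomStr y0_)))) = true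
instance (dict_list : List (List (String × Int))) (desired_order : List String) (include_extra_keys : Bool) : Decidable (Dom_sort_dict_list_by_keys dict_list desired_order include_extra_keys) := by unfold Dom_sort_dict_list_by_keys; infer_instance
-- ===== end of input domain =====

-- B reorders each dict by ONE stable sort of its items under a precomputed first-occurrence
-- rank table, instead of A's two passes (comprehension over desired_order, then a scan of the
-- dict with a linear membership test per key); objective: faster (the rank dict removes the
-- repeated linear scans; measured faster in a timing run). Equivalence of return values.

-- ===== PORT A =====
-- (the `isinstance` check cannot fail here: the argument type already makes every element a dict)
def sort_dict_list_by_keys (dict_list : List (List (String × Int))) (desired_order : List String) (include_extra_keys : Bool) : List (List (String × Int)) :=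
  dict_list.foldl (fun result d0 =>
    let d := PySem.Dict.ofList d0
    let sorted_dict := desired_order.foldl
      (fun sd key => if d.contains key then sd.insert key (d.getD key 0) else sd)
      PySem.Dict.empty
    let sorted_dict := if include_extra_keys then
        d.keys.foldl
          (fun sd key => if desired_order.contains key then sd else sd.insert key (d.getD key 0))
          sorted_dict
      else sorted_dict
    result ++ [sorted_dict.items]) []

-- ===== PORT B =====
def sort_dict_list_by_keys_alt (dict_list : List (List (String × Int))) (desired_order : List String) (include_extra_keys : Bool) : List (List (String × Int)) :=
  let rank := (PySem.List.enumerate desired_order 0).foldl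
    (fun r p => r.setdefault p.2 p.1) PySem.Dict.empty
  let sentinel : Int := PySem.List.len desired_order
  dict_list.map (fun d0 =>
    let items := (PySem.Dict.ofList d0).items
    let kept := if include_extra_keys then items
      else items.filter (fun kv => rank.contains kv.1)
    (PySem.Dict.ofList
      (PySem.List.sorted kept (fun kv => rank.getD kv.1 sentinel) false)).items)

-- ===== PRECONDITION & SPEC =====
def Spec_sort_dict_list_by_keys (dict_list : List (List (String × Int))) (desired_order : List String) (include_extra_keys : Bool) (out : List (List (String × Int))) : Prop := out = sort_dict_list_by_keys_alt dict_list desired_order include_extra_keys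
instance (dict_list : List (List (String × Int))) (desired_order : List String) (include_extra_keys : Bool) (out : List (List (String × Int))) : Decidable (Spec_sort_dict_list_by_keys dict_list desired_order include_extra_keys out) := by unfold Spec_sort_dict_list_by_keys; infer_instance

-- ===== CLAIM (what is proved, stated in full; the proofs are below) =====
def Claim_equal_sort_dict_list_by_keys : Prop := ∀ (dict_list : List (List (String × Int))) (desired_order : List String) (include_extra_keys : Bool), Dom_sort_dict_list_by_keys dict_list desired_order include_extra_keys → Spec_sort_dict_list_by_keys dict_list desired_order include_extra_keys (sort_dict_list_by_keys dict_list desired_order include_extra_keys)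

-- ===== LEMMAS AND PROOFS =====

-- first index of k in o, with o.length as the sentinel for absent keys
def pvIdxN (o : List String) (k : String) : Nat :=
  (PySem.List.index? o k).getD o.length

theorem pv_items_ofList_of_nodup_fst (l : List (String × Int)) (h : (l.map Prod.fst).Nodup) :
    (PySem.Dict.ofList l).items = l := by
  have := PySem.Dict.items_foldl_insert_fresh l Prod.fst Prod.snd PySem.Dict.empty
    (by intro a _; exact PySem.Dict.contains_empty _) h
  simpa [PySem.Dict.ofList, PySem.Dict.update] using this

theorem pv_insertBy_append_of_before {α : Type} (before : α → α → Bool) (x : α) (hi : List α)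
    (hhi : ∀ h ∈ hi, before x h = true) :
    ∀ lo : List α, PySem.List.insertBy before x (lo ++ hi) = PySem.List.insertBy before x lo ++ hi := by
  intro lo
  induction lo with
  | nil =>
    cases hi with
    | nil => simp [PySem.List.insertBy]
    | cons h t => simp [PySem.List.insertBy, hhi h (by simp)]
  | cons y lo ih =>
    by_cases hy : before x y = true <;> simp [PySem.List.insertBy, hy, ih]

theorem pv_rank_get? :
    ∀ (l : List String) (s : Int) (dd : PySem.Dict String Int) (k : String),
      ((PySem.List.enumerate l s).foldl (fun r p => r.setdefault p.2 p.1) dd).get? k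
        = if dd.contains k then dd.get? k else (PySem.List.index? l k).map (fun n => s + n) := by
  intro l
  induction l with
  | nil =>
    intro s dd k
    by_cases h : dd.contains k = true
    · simp [PySem.List.enumerate, h]
    · simp [PySem.List.enumerate, h]
      rw [PySem.Dict.contains_eq_isSome_get?] at h
      simpa using Option.not_isSome_iff_eq_none.mp (by simpa using h)
  | cons x t ih =>
    intro s dd k
    rw [PySem.List.enumerate_cons]
    simp only [List.foldl_cons]
    by_cases hx : dd.contains x = true
    · rw [PySem.Dict.setdefault_of_contains dd s hx, ih]
      by_cases hk : dd.contains k = true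
      · simp [hk]
      · have hkx : k ≠ x := by rintro rfl; exact hk hx
        rw [PySem.List.index?_cons_of_ne t (Ne.symm hkx)]
        cases PySem.List.index? t k <;> simp [hk] <;> ring
    · rw [PySem.Dict.setdefault_of_not_contains dd s (by simpa using hx), ih]
      by_cases hkx : k = x
      · subst hkx
        simp [PySem.Dict.contains_insert_self, PySem.Dict.get?_insert_self, hx,
          PySem.List.index?, List.idxOf?_cons]
      · rw [PySem.Dict.contains_insert, PySem.List.index?_cons_of_ne t (Ne.symm hkx)]
        by_cases hk : dd.contains k = true
        · simp [hk, hkx, PySem.Dict.get?_insert]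
        · cases PySem.List.index? t k <;> simp [hk, hkx] <;> ring

theorem pv_foldl_insert_items (g : String → Int) :
    ∀ (l : List String) (dd : PySem.Dict String Int),
      dd.keys.Nodup → (∀ k v, (k, v) ∈ dd.items → v = g k) →
      (l.foldl (fun sd k => sd.insert k (g k)) dd).items
        = dd.items ++ ((PySem.List.dedup l).filter (fun k => !dd.contains k)).map (fun k => (k, g k)) := by
  intro l
  induction l with
  | nil => intro dd _ _; simp [PySem.List.dedup, PySem.Set.ofList]
  | cons x t ih =>
    intro dd hnd hv
    simp only [List.foldl_cons, PySem.List.dedup, PySem.Set.ofList_cons, PySem.Set.discard,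
      List.filter_cons]
    by_cases hx : dd.contains x = true
    · have heq : dd.insert x (g x) = dd := by
        apply PySem.Dict.ext
        rw [PySem.Dict.items_insert_of_contains dd (g x) hx]
        rw [show dd.items = dd.items.map (fun p => p) from (List.map_id' dd.items).symm]
        simp only [List.map_map]
        apply List.map_congr_left
        rintro ⟨a, b⟩ hp
        by_cases h1 : a = x
        · subst h1
          have hb : b = g a := hv a b (by simpa using hp)
          simp [hb]
        · simp [h1]
      rw [heq, ih dd hnd hv, hx]
      simp only [Bool.not_true, Bool.false_eq_true, if_false, PySem.List.dedup]
      congr 2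
      rw [List.filter_filter]
      apply List.filter_congr
      intro y _
      by_cases hyx : y = x
      · simp [hyx, hx]
      · simp [hyx]
    · have hx' : dd.contains x = false := by simpa using hx
      have hnd' : (dd.insert x (g x)).keys.Nodup := PySem.Dict.nodup_keys_insert dd x (g x) hnd
      have hv' : ∀ k v, (k, v) ∈ (dd.insert x (g x)).items → v = g k := by
        intro k v hkv
        rw [PySem.Dict.items_insert_of_not_contains dd (g x) hx'] at hkv
        rcases List.mem_append.mp hkv with h | h
        · exact hv k v h
        · simp at h; rw [h.2, h.1]
      rw [ih (dd.insert x (g x)) hnd' hv',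
        PySem.Dict.items_insert_of_not_contains dd (g x) hx', hx']
      simp only [Bool.not_false, if_true, List.map_cons, List.append_assoc, List.cons_append,
        List.nil_append, PySem.List.dedup]
      congr 3
      rw [List.filter_filter]
      apply List.filter_congr
      intro y _
      rw [PySem.Dict.contains_insert]
      by_cases hyx : y = x
      · simp [hyx, hx']
      · simp [Bool.and_comm]

theorem pv_sorted_split_max {α : Type} (key : α → Int) (M : Int) :
    ∀ xs : List α, (∀ x ∈ xs, key x ≤ M) →
      PySem.List.sorted xs key false
        = PySem.List.sorted (xs.filter (fun x => decide (key x < M))) key false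
            ++ xs.filter (fun x => decide (key x = M)) := by
  intro xs
  induction xs using List.reverseRecOn with
  | nil => simp [PySem.List.sorted]
  | append_singleton xs x ih =>
    intro hle
    have hxs : ∀ y ∈ xs, key y ≤ M := fun y hy => hle y (by simp [hy])
    have hx : key x ≤ M := hle x (by simp)
    rw [PySem.List.sorted_eq_foldl_insertBy, List.foldl_append, List.foldl_cons, List.foldl_nil,
      ← PySem.List.sorted_eq_foldl_insertBy, ih hxs]
    by_cases hM : key x = M
    · have h1 : List.filter (fun x => decide (key x < M)) (xs ++ [x])
          = List.filter (fun x => decide (key x < M)) xs := by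
        simp [List.filter_append, hM]
      have h2 : List.filter (fun x => decide (key x = M)) (xs ++ [x])
          = List.filter (fun x => decide (key x = M)) xs ++ [x] := by
        simp [List.filter_append, hM]
      rw [h1, h2,
        PySem.List.insertBy_of_forall_not_before _ x _ (by
          intro y hy
          rcases List.mem_append.mp hy with hy | hy
          · have hy' := (PySem.List.mem_sorted _ _ _ y).mp hy
            have := hxs y (List.mem_filter.mp hy').1
            simp; omega
          · have := (List.mem_filter.mp hy).2
            simp at this ⊢; omega),
        List.append_assoc]
    · have hlt : key x < M := lt_of_le_of_ne hx hM
      have h1 : List.filter (fun x => decide (key x < M)) (xs ++ [x])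
          = List.filter (fun x => decide (key x < M)) xs ++ [x] := by
        simp [List.filter_append, hlt]
      have h2 : List.filter (fun x => decide (key x = M)) (xs ++ [x])
          = List.filter (fun x => decide (key x = M)) xs := by
        simp [List.filter_append, hM]
      rw [h1, h2, pv_insertBy_append_of_before _ x _ (by
        intro h hh
        have := (List.mem_filter.mp hh).2
        simp at this ⊢; omega)]
      congr 1
      symm
      rw [PySem.List.sorted_eq_foldl_insertBy, List.foldl_append, List.foldl_cons, List.foldl_nil,
        ← PySem.List.sorted_eq_foldl_insertBy]

theorem pvIdxN_cons_self (x : String) (t : List String) : pvIdxN (x :: t) x = 0 := by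
  simp [pvIdxN, PySem.List.index?, List.idxOf?_cons]

theorem pvIdxN_cons_of_ne (x k : String) (t : List String) (h : k ≠ x) :
    pvIdxN (x :: t) k = pvIdxN t k + 1 := by
  rw [pvIdxN, pvIdxN, PySem.List.index?_cons_of_ne t (Ne.symm h)]
  cases PySem.List.index? t k <;> simp

theorem pv_pairwise_idx (o : List String) (p : String → Bool) :
    (PySem.List.dedup (o.filter p)).Pairwise (fun a b => pvIdxN o a < pvIdxN o b) := by
  induction o with
  | nil => simp [PySem.List.dedup, PySem.Set.ofList]
  | cons x t ih =>
    rw [List.filter_cons]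
    by_cases hp : p x = true
    · simp only [hp, if_true, PySem.List.dedup, PySem.Set.ofList_cons, PySem.Set.discard]
      constructor
      · intro b hb
        have hbx : b ≠ x := by
          have := (List.mem_filter.mp hb).2; simpa using this
        rw [pvIdxN_cons_self, pvIdxN_cons_of_ne x b t hbx]
        omega
      · have hpw := (List.Pairwise.filter (fun y => !y == x)) ih
        apply hpw.imp_of_mem
        intro a b ha hb hab
        have hax : a ≠ x := by have := (List.mem_filter.mp ha).2; simpa using this
        have hbx : b ≠ x := by have := (List.mem_filter.mp hb).2; simpa using this
        rw [pvIdxN_cons_of_ne x a t hax, pvIdxN_cons_of_ne x b t hbx]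
        omega
    · simp only [hp, Bool.false_eq_true, if_false]
      apply ih.imp_of_mem
      intro a b ha hb hab
      have hax : a ≠ x := by
        rintro rfl
        have : p a = true := (List.mem_filter.mp ((PySem.List.mem_dedup _ _).mp ha)).2
        exact hp this
      have hbx : b ≠ x := by
        rintro rfl
        have : p b = true := (List.mem_filter.mp ((PySem.List.mem_dedup _ _).mp hb)).2
        exact hp this
      rw [pvIdxN_cons_of_ne x a t hax, pvIdxN_cons_of_ne x b t hbx]
      omega

theorem pv_idx_le (o : List String) (k : String) : pvIdxN o k ≤ o.length := by
  induction o with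
  | nil => simp [pvIdxN, PySem.List.index?]
  | cons x t ih =>
    by_cases h : k = x
    · subst h; rw [pvIdxN_cons_self]; simp
    · rw [pvIdxN_cons_of_ne x k t h]; simpa using ih

theorem pv_idx_lt_iff_mem (o : List String) (k : String) :
    pvIdxN o k < o.length ↔ k ∈ o := by
  induction o with
  | nil => simp [pvIdxN, PySem.List.index?]
  | cons x t ih =>
    by_cases h : k = x
    · subst h; rw [pvIdxN_cons_self]; simp
    · rw [pvIdxN_cons_of_ne x k t h]; simp [h, ih]

theorem pv_rank_getD (o : List String) (k : String) :
    ((PySem.List.enumerate o 0).foldl (fun r p => r.setdefault p.2 p.1)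
        PySem.Dict.empty).getD k (PySem.List.len o) = ((pvIdxN o k : Nat) : Int) := by
  rw [PySem.Dict.getD_eq_get?_getD, pv_rank_get?]
  simp only [PySem.Dict.contains_empty, Bool.false_eq_true, if_false, pvIdxN, PySem.List.len]
  cases PySem.List.index? o k <;> simp

theorem pv_rank_contains (o : List String) (k : String) :
    ((PySem.List.enumerate o 0).foldl (fun r p => r.setdefault p.2 p.1)
        PySem.Dict.empty).contains k = o.contains k := by
  rw [PySem.Dict.contains_eq_isSome_get?, pv_rank_get?]
  simp only [PySem.Dict.contains_empty, Bool.false_eq_true, if_false]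
  induction o with
  | nil => simp [PySem.List.index?]
  | cons x t ih =>
    by_cases h : x = k
    · subst h; simp [PySem.List.index?, List.idxOf?_cons]
    · rw [PySem.List.index?_cons_of_ne t h, show ((x :: t).contains k) = (k == x || t.contains k)
        from by by_cases hkx : k = x <;> simp [hkx], ← ih]
      cases PySem.List.index? t k <;> simp [show ¬k = x from fun hh => h hh.symm]

theorem pv_foldl_if_pos {α β : Type} (p : α → Bool) (f : β → α → β) :
    ∀ (l : List α) (s : β),
      l.foldl (fun s k => if p k then f s k else s) s = (l.filter p).foldl f s := by
  intro l
  induction l with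
  | nil => simp
  | cons x t ih =>
    intro s
    by_cases h : p x = true <;> simp [h, ih]

theorem pv_foldl_if_neg {α β : Type} (p : α → Bool) (f : β → α → β) :
    ∀ (l : List α) (s : β),
      l.foldl (fun s k => if p k then s else f s k) s = (l.filter (fun k => !p k)).foldl f s := by
  intro l
  induction l with
  | nil => simp
  | cons x t ih =>
    intro s
    by_cases h : p x = true <;> simp [h, ih]

theorem pv_s1_items (o : List String) (d : PySem.Dict String Int) :
    (o.foldl (fun sd key => if d.contains key then sd.insert key (d.getD key 0) else sd)
      PySem.Dict.empty).items
    = (PySem.List.dedup (o.filter (fun k => d.contains k))).map (fun k => (k, d.getD k 0)) := by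
  rw [pv_foldl_if_pos (fun key => d.contains key) (fun sd k => sd.insert k (d.getD k 0)) o
    PySem.Dict.empty]
  rw [pv_foldl_insert_items (fun k => d.getD k 0) _ PySem.Dict.empty (by simp [PySem.Dict.empty]) (by simp [PySem.Dict.empty])]
  simp [PySem.Dict.empty]

theorem pv_s2_items (o : List String) (d dd : PySem.Dict String Int)
    (hnd : dd.keys.Nodup) (hnk : d.keys.Nodup)
    (hv : ∀ k v, (k, v) ∈ dd.items → v = d.getD k 0)
    (hsub : ∀ k ∈ dd.keys, o.contains k = true) :
    (d.keys.foldl (fun sd key => if o.contains key then sd else sd.insert key (d.getD key 0)) dd).items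
    = dd.items ++ (d.keys.filter (fun k => !o.contains k)).map (fun k => (k, d.getD k 0)) := by
  rw [pv_foldl_if_neg (fun key => o.contains key) (fun sd k => sd.insert k (d.getD k 0)) d.keys dd]
  rw [pv_foldl_insert_items (fun k => d.getD k 0) _ dd hnd hv]
  congr 1
  rw [show PySem.List.dedup (d.keys.filter (fun k => !o.contains k))
      = d.keys.filter (fun k => !o.contains k) from
    PySem.Set.ofList_eq_self_of_nodup _ (hnk.filter _)]
  congr 1
  apply List.filter_eq_self.mpr
  intro k hkm
  have hko : o.contains k = false := by
    have := (List.mem_filter.mp hkm).2; simpa using this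
  have : k ∉ dd.keys := by
    intro hmem
    rw [hsub k hmem] at hko; exact Bool.true_eq_false.mp hko
  rw [show dd.contains k = false from by
    rcases Bool.eq_false_or_eq_true (dd.contains k) with h | h
    · exact absurd ((PySem.Dict.contains_iff_mem_keys dd k).mp h) this
    · exact h]
  simp

theorem pv_sorted_low (o : List String) (d : PySem.Dict String Int) (hk : d.keys.Nodup) :
    PySem.List.sorted (d.items.filter (fun kv => o.contains kv.1))
      (fun kv => ((pvIdxN o kv.1 : Nat) : Int)) false
    = (PySem.List.dedup (o.filter (fun k => d.contains k))).map (fun k => (k, d.getD k 0)) := by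
  apply PySem.List.sorted_eq_of_perm_of_pairwise_lt
  · rw [PySem.Dict.items_eq_map_keys d hk 0, List.filter_map]
    apply List.Perm.map
    apply (List.perm_ext_iff_of_nodup (PySem.Set.nodup_ofList _) (hk.filter _)).mpr
    intro k
    simp [PySem.Set.mem_ofList, PySem.Dict.contains_iff_mem_keys,
      Function.comp, and_comm]
  · rw [List.pairwise_map]
    exact (pv_pairwise_idx o (fun k => d.contains k)).imp (by intro a b h; exact_mod_cast h)

theorem pv_per_dict (o : List String) (ie : Bool) (d0 : List (String × Int)) :
    (if ie then
       (PySem.Dict.ofList d0).keys.foldl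
         (fun sd key => if o.contains key then sd
           else sd.insert key ((PySem.Dict.ofList d0).getD key 0))
         (o.foldl (fun sd key => if (PySem.Dict.ofList d0).contains key
             then sd.insert key ((PySem.Dict.ofList d0).getD key 0) else sd) PySem.Dict.empty)
     else
       o.foldl (fun sd key => if (PySem.Dict.ofList d0).contains key
           then sd.insert key ((PySem.Dict.ofList d0).getD key 0) else sd) PySem.Dict.empty).items
    =
    (PySem.Dict.ofList (PySem.List.sorted
       (if ie then (PySem.Dict.ofList d0).items
        else (PySem.Dict.ofList d0).items.filter (fun kv =>
          ((PySem.List.enumerate o 0).foldl (fun r p => r.setdefault p.2 p.1)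
            PySem.Dict.empty).contains kv.1))
       (fun kv => ((PySem.List.enumerate o 0).foldl (fun r p => r.setdefault p.2 p.1)
          PySem.Dict.empty).getD kv.1 (PySem.List.len o))
       false)).items := by
  have hk : (PySem.Dict.ofList d0).keys.Nodup := PySem.Dict.nodup_keys_ofList d0
  set d := PySem.Dict.ofList d0 with hd
  -- replace the rank lookups by pvIdxN
  rw [show (fun kv : String × Int => ((PySem.List.enumerate o 0).foldl
        (fun r p => r.setdefault p.2 p.1) PySem.Dict.empty).getD kv.1 (PySem.List.len o))
      = (fun kv : String × Int => ((pvIdxN o kv.1 : Nat) : Int)) from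
    funext fun kv => pv_rank_getD o kv.1]
  rw [show (fun kv : String × Int => ((PySem.List.enumerate o 0).foldl
        (fun r p => r.setdefault p.2 p.1) PySem.Dict.empty).contains kv.1)
      = (fun kv : String × Int => o.contains kv.1) from
    funext fun kv => pv_rank_contains o kv.1]
  have hs1 := pv_s1_items o d
  -- the two halves of A's output
  set DKm := (PySem.List.dedup (o.filter (fun k => d.contains k))).map
    (fun k => (k, d.getD k 0)) with hDKm
  set K2m := (d.keys.filter (fun k => !o.contains k)).map (fun k => (k, d.getD k 0)) with hK2m
  have hcompid : (Prod.fst ∘ fun k : String => (k, d.getD k 0)) = id := rfl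
  have hfstDK : DKm.map Prod.fst = PySem.List.dedup (o.filter (fun k => d.contains k)) := by
    rw [hDKm, List.map_map, hcompid, List.map_id]
  have hfstK2 : K2m.map Prod.fst = d.keys.filter (fun k => !o.contains k) := by
    rw [hK2m, List.map_map, hcompid, List.map_id]
  cases ie with
  | false =>
    rw [if_neg Bool.false_ne_true, if_neg Bool.false_ne_true]
    have hkept : d.items.filter (fun kv => o.contains kv.1)
        = d.items.filter (fun kv => o.contains kv.1) := rfl
    rw [hs1, pv_sorted_low o d hk, ← hDKm]
    rw [pv_items_ofList_of_nodup_fst DKm (by rw [hfstDK]; exact PySem.Set.nodup_ofList _)]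
  | true =>
    rw [if_pos rfl, if_pos rfl]
    -- A side
    have hvals1 : ∀ k v, (k, v) ∈ (o.foldl (fun sd key => if d.contains key
        then sd.insert key (d.getD key 0) else sd) PySem.Dict.empty).items → v = d.getD k 0 := by
      intro k v hkv
      rw [hs1, hDKm] at hkv
      simp only [List.mem_map, Prod.mk.injEq] at hkv
      obtain ⟨a, -, ha, hv⟩ := hkv
      rw [← hv, ha]
    have hkeys1 : (o.foldl (fun sd key => if d.contains key
        then sd.insert key (d.getD key 0) else sd) PySem.Dict.empty).keys
        = PySem.List.dedup (o.filter (fun k => d.contains k)) := by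
      show ((o.foldl (fun sd key => if d.contains key
        then sd.insert key (d.getD key 0) else sd) PySem.Dict.empty).items).map Prod.fst = _
      rw [hs1]; exact hfstDK
    have hnd1 : (o.foldl (fun sd key => if d.contains key
        then sd.insert key (d.getD key 0) else sd) PySem.Dict.empty).keys.Nodup := by
      rw [hkeys1]; exact PySem.Set.nodup_ofList _
    have hsub1 : ∀ k ∈ (o.foldl (fun sd key => if d.contains key
        then sd.insert key (d.getD key 0) else sd) PySem.Dict.empty).keys, o.contains k = true := by
      intro k hkm
      rw [hkeys1] at hkm
      simp only [PySem.List.dedup] at hkm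
      have hkm2 := (PySem.Set.mem_ofList _ k).mp hkm
      simpa using (List.mem_filter.mp hkm2).1
    rw [pv_s2_items o d _ hnd1 hk hvals1 hsub1, hs1, ← hK2m]
    -- B side
    have hle : ∀ kv ∈ d.items, ((pvIdxN o kv.1 : Nat) : Int) ≤ ((o.length : Nat) : Int) := by
      intro kv _
      exact_mod_cast pv_idx_le o kv.1
    rw [show ((o.length : Nat) : Int) = ((o.length : Nat) : Int) from rfl] at hle
    rw [pv_sorted_split_max (fun kv : String × Int => ((pvIdxN o kv.1 : Nat) : Int))
      ((o.length : Nat) : Int) d.items hle]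
    have hlowf : d.items.filter (fun kv => decide (((pvIdxN o kv.1 : Nat) : Int) < ((o.length : Nat) : Int)))
        = d.items.filter (fun kv => o.contains kv.1) := by
      apply List.filter_congr
      intro kv _
      have h1 : (((pvIdxN o kv.1 : Nat) : Int) < ((o.length : Nat) : Int)) ↔ kv.1 ∈ o := by
        rw [Int.ofNat_lt]; exact pv_idx_lt_iff_mem o kv.1
      by_cases hm : kv.1 ∈ o
      · simp [h1, hm]
      · simp [h1, hm]
    have hhighf : d.items.filter (fun kv => decide (((pvIdxN o kv.1 : Nat) : Int) = ((o.length : Nat) : Int)))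
        = K2m := by
      rw [hK2m, PySem.Dict.items_eq_map_keys d hk 0, List.filter_map]
      congr 1
      apply List.filter_congr
      intro k _
      have hle' : pvIdxN o k ≤ o.length := pv_idx_le o k
      have h1 : (((pvIdxN o k : Nat) : Int) = ((o.length : Nat) : Int)) ↔ ¬ k ∈ o := by
        rw [Int.ofNat_inj, ← pv_idx_lt_iff_mem o k]
        omega
      by_cases hm : k ∈ o
      · simp [Function.comp, h1, hm]
      · simp [Function.comp, h1, hm]
    rw [hlowf, hhighf, pv_sorted_low o d hk, ← hDKm]
    rw [pv_items_ofList_of_nodup_fst (DKm ++ K2m) (by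
      rw [List.map_append, hfstDK, hfstK2]
      apply List.Nodup.append (PySem.Set.nodup_ofList _) (hk.filter _)
      intro k hk1 hk2
      have hk1' := List.mem_filter.mp ((PySem.List.mem_dedup _ _).mp hk1)
      have h2 := (List.mem_filter.mp hk2).2
      simp at h2
      exact h2 hk1'.1)]


theorem pv_foldl_append_map {α β : Type} (f : α → β) :
    ∀ (l : List α) (acc : List β), l.foldl (fun r x => r ++ [f x]) acc = acc ++ l.map f := by
  intro l
  induction l with
  | nil => simp
  | cons x t ih => intro acc; simp [ih]

theorem main_equal (dict_list : List (List (String × Int))) (desired_order : List String) (include_extra_keys : Bool) :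
    sort_dict_list_by_keys dict_list desired_order include_extra_keys
      = sort_dict_list_by_keys_alt dict_list desired_order include_extra_keys := by
  simp only [sort_dict_list_by_keys, sort_dict_list_by_keys_alt]
  rw [pv_foldl_append_map]
  rw [List.nil_append]
  apply List.map_congr_left
  intro d0 _
  exact pv_per_dict desired_order include_extra_keys d0

-- ===== VERDICT (by name: the statement is the Claim_ definition above) =====
theorem sort_dict_list_by_keys_spec : Claim_equal_sort_dict_list_by_keys := by
  intro dict_list desired_order include_extra_keys _
  unfold Spec_sort_dict_list_by_keys
  exact main_equal dict_list desired_order include_extra_keys
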